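-- pv_equiv track=rewrite | github.com/dualform-labs/m5-infer | app/innovation/x4_context_fold/schema_analyzer.py | _find_common_prefix_length
-- ===== SOURCE A (Python) =====
-- def _find_common_prefix_length(token_lists: list[list[int]]) -> int:
--     """Find the length of the common prefix across all token lists."""
--     if not token_lists:
--         return 0
--     min_len = min(len(t) for t in token_lists)
--     prefix_len = 0
--     for i in range(min_len):
--         if all(t[i] == token_lists[0][i] for t in token_lists):
--             prefix_len = i + 1
--         else:
--             break
--     return prefix_len
-- ===== SOURCE B (Python) =====
-- def _find_common_prefix_length(token_lists: list[list[int]]) -> int: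
--     """Pairwise reduction (horizontal scan): shrink a running prefix against each list."""
--     if not token_lists:
--         return 0
--     prefix = token_lists[0]
--     for t in token_lists[1:]:
--         k = 0
--         while k < len(prefix) and k < len(t) and prefix[k] == t[k]:
--             k += 1
--         prefix = prefix[:k]
--     return len(prefix)
-- ===== Notes on version B (the rewrite author's own statement) =====
-- stated objective: alternative
-- what changed: B replaces A's column-major scan (precomputed min length, index loop checking every list at each position) by a row-major pairwise reduction: it keeps a running common prefix, shrinking it against each list in turn, and returns its final length.
import Mathlib
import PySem

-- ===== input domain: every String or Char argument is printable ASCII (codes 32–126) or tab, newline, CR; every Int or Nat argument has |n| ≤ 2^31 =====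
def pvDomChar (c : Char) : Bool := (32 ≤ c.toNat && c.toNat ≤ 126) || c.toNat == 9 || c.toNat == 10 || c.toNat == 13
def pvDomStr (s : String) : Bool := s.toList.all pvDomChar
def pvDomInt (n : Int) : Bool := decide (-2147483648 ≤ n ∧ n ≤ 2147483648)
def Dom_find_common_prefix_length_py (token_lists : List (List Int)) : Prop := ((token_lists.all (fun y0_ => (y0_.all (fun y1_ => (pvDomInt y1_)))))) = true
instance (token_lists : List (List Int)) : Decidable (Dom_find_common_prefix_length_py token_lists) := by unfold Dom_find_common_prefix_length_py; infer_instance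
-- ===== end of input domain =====

-- B replaces A's column-major min-length+index scan by a row-major pairwise reduction (a running prefix shrunk against each list); objective: alternative.


-- ===== PORT A =====
-- A's `for i in range(min_len): … else break` loop: prefix_len always equals i on entry
def pvLoopA (ts : List (List Int)) (min_len : Int) (i : Nat) (prefix_len : Int) : Int :=
  if (i : Int) < min_len then
    -- t[i] / token_lists[0][i]: i is always in range here (i < min_len ≤ len t), so pyGetD is exact
    if ts.all (fun t => PySem.List.pyGetD t (i : Int) 0 == PySem.List.pyGetD (ts.headD []) (i : Int) 0) then
      pvLoopA ts min_len (i + 1) ((i : Int) + 1)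
    else prefix_len
  else prefix_len
termination_by min_len.toNat - i
decreasing_by omega

def find_common_prefix_length_py (token_lists : List (List Int)) : Int :=
  if token_lists = [] then 0
  else
    let min_len := (PySem.List.min? (token_lists.map (fun t => (t.length : Int))) (fun x => x)).getD 0
    pvLoopA token_lists min_len 0 0

-- ===== PORT B =====
-- Source B's inner `while k < len(prefix) and k < len(t) and prefix[k] == t[k]: k += 1`
-- (k is always in range when read, so pyGetD is exact)
def pvLcpIdx (a b : List Int) (k : Nat) : Nat :=
  if k < a.length ∧ k < b.length ∧ PySem.List.pyGetD a (k : Int) 0 = PySem.List.pyGetD b (k : Int) 0 then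
    pvLcpIdx a b (k + 1)
  else k
termination_by a.length - k
decreasing_by omega

-- one iteration of Source B's for-body: prefix = prefix[:k]  (k ≥ 0, so the slice is List.take)
def pvShrink (pre t : List Int) : List Int := pre.take (pvLcpIdx pre t 0)

def find_common_prefix_length_py_alt (token_lists : List (List Int)) : Int :=
  match token_lists with
  | [] => 0
  | first :: rest => ((rest.foldl pvShrink first).length : Int)

-- ===== PRECONDITION & SPEC =====
def Spec_find_common_prefix_length_py (token_lists : List (List Int)) (out : Int) : Prop := out = find_common_prefix_length_py_alt token_lists
instance (token_lists : List (List Int)) (out : Int) : Decidable (Spec_find_common_prefix_length_py token_lists out) := by unfold Spec_find_common_prefix_length_py; infer_instance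

-- ===== CLAIM (what is proved, stated in full; the proofs are below) =====
def Claim_equal_find_common_prefix_length_py : Prop := ∀ (token_lists : List (List Int)), Dom_find_common_prefix_length_py token_lists → Spec_find_common_prefix_length_py token_lists (find_common_prefix_length_py token_lists)

-- ===== LEMMAS AND PROOFS =====

-- proof-side reference: the columns of the family (zip-transpose) and the count of equal columns
def pvCols : List (List Int) → List (List Int)
  | [] => []
  | t :: rest =>
    if (t :: rest).any List.isEmpty then []
    else ((t :: rest).map (fun l => l.headD 0)) :: pvCols ((t :: rest).map List.tail)
termination_by ts => (ts.headD []).length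
decreasing_by
  simp_all
  cases t with
  | nil => simp_all
  | cons a l => simp

def pvCountB : List (List Int) → Int
  | [] => 0
  | c :: rest => if c.any (fun x => x != c.headD 0) then 0 else 1 + pvCountB rest

-- proof-side structural longest common prefix of two lists
def pvLcpS : List Int → List Int → List Int
  | x :: xs, y :: ys => if x = y then x :: pvLcpS xs ys else []
  | _, _ => []

lemma pvLcpS_nil_right (a : List Int) : pvLcpS a [] = [] := by
  cases a <;> rfl

lemma pvLcpIdx_eq (a b : List Int) : ∀ k : Nat,
    pvLcpIdx a b k = k + (pvLcpS (a.drop k) (b.drop k)).length := by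
  have key : ∀ n k : Nat, a.length - k ≤ n →
      pvLcpIdx a b k = k + (pvLcpS (a.drop k) (b.drop k)).length := by
    intro n
    induction n with
    | zero =>
      intro k hk
      have ha : a.length ≤ k := by omega
      rw [pvLcpIdx, if_neg (by omega)]
      rw [List.drop_eq_nil_of_le ha]
      simp [pvLcpS]
    | succ n ih =>
      intro k hk
      by_cases hc : k < a.length ∧ k < b.length ∧
          PySem.List.pyGetD a (k : Int) 0 = PySem.List.pyGetD b (k : Int) 0
      · obtain ⟨h1, h2, h3⟩ := hc
        rw [pvLcpIdx, if_pos ⟨h1, h2, h3⟩, ih (k+1) (by omega)]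
        rw [List.drop_eq_getElem_cons h1, List.drop_eq_getElem_cons h2]
        rw [PySem.List.pyGetD_natCast, PySem.List.pyGetD_natCast,
          List.getD_eq_getElem _ _ h1, List.getD_eq_getElem _ _ h2] at h3
        rw [pvLcpS, if_pos h3]
        simp
        omega
      · rw [pvLcpIdx, if_neg hc]
        by_cases h1 : k < a.length
        · by_cases h2 : k < b.length
          · have h3 : a[k] ≠ b[k] := by
              intro he
              exact hc ⟨h1, h2, by
                rw [PySem.List.pyGetD_natCast, PySem.List.pyGetD_natCast,
                  List.getD_eq_getElem _ _ h1, List.getD_eq_getElem _ _ h2]; exact he⟩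
            rw [List.drop_eq_getElem_cons h1, List.drop_eq_getElem_cons h2]
            rw [pvLcpS, if_neg h3]
            simp
          · rw [List.drop_eq_nil_of_le (by omega : b.length ≤ k), pvLcpS_nil_right]
            simp
        · rw [List.drop_eq_nil_of_le (by omega : a.length ≤ k)]
          simp [pvLcpS]
  intro k
  exact key (a.length - k) k le_rfl

lemma pvLcpS_take (a : List Int) : ∀ b, a.take ((pvLcpS a b).length) = pvLcpS a b := by
  induction a with
  | nil => intro b; cases b <;> rfl
  | cons x xs ih =>
    intro b
    cases b with
    | nil => rfl
    | cons y ys =>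
      rw [pvLcpS]
      split_ifs with h
      · simp [ih ys]
      · rfl

lemma pvShrink_eq (a b : List Int) : pvShrink a b = pvLcpS a b := by
  unfold pvShrink
  rw [pvLcpIdx_eq a b 0]
  simpa using pvLcpS_take a b

-- base: a single list is its own common prefix
lemma pvN_single (t : List Int) : pvCountB (pvCols [t]) = (t.length : Int) := by
  induction t with
  | nil => rw [pvCols]; simp [pvCountB]
  | cons a t' ih =>
    rw [pvCols]
    rw [if_neg (by simp)]
    simp only [List.map_cons, List.map_nil, List.headD_cons, List.tail_cons]
    simp only [pvCountB]
    rw [if_neg (by simp)]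
    rw [ih]
    simp
    ring

-- pairwise absorption: folding the second list into the first does not change the column count
lemma pvN_pairwise (t : List Int) : ∀ (r : List Int) (rs : List (List Int)),
    pvCountB (pvCols (t :: r :: rs)) = pvCountB (pvCols (pvLcpS t r :: rs)) := by
  induction t with
  | nil =>
    intro r rs
    have h1 : pvCols ([] :: r :: rs) = [] := by
      rw [pvCols]; simp
    have h2 : pvCols (pvLcpS [] r :: rs) = [] := by
      cases r <;> (rw [show pvLcpS [] _ = [] from rfl]; rw [pvCols]; simp)
    rw [h1, h2]
  | cons a t' ih =>
    intro r rs
    cases r with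
    | nil =>
      have h1 : pvCols ((a :: t') :: [] :: rs) = [] := by
        rw [pvCols]; simp
      have h2 : pvCols (pvLcpS (a :: t') [] :: rs) = [] := by
        rw [pvLcpS_nil_right, pvCols]; simp
      rw [h1, h2]
    | cons b r' =>
      by_cases hab : a = b
      · subst hab
        rw [show pvLcpS (a :: t') (a :: r') = a :: pvLcpS t' r' from by rw [pvLcpS, if_pos rfl]]
        by_cases hemp : rs.any List.isEmpty
        · have h1 : pvCols ((a :: t') :: (a :: r') :: rs) = [] := by
            rw [pvCols]; simp [hemp]
          have h2 : pvCols ((a :: pvLcpS t' r') :: rs) = [] := by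
            rw [pvCols]; simp [hemp]
          rw [h1, h2]
        · have h1 : pvCols ((a :: t') :: (a :: r') :: rs)
              = (a :: a :: rs.map (fun l => l.headD 0))
                :: pvCols (t' :: r' :: rs.map List.tail) := by
            rw [pvCols]
            simp [hemp]
          have h2 : pvCols ((a :: pvLcpS t' r') :: rs)
              = (a :: rs.map (fun l => l.headD 0)) :: pvCols (pvLcpS t' r' :: rs.map List.tail) := by
            rw [pvCols]
            simp [hemp]
          rw [h1, h2]
          simp only [pvCountB]
          have hg : (a :: a :: rs.map (fun l => l.headD 0)).any
                (fun x => x != (a :: a :: rs.map (fun l => l.headD 0)).headD 0)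
              = (a :: rs.map (fun l => l.headD 0)).any
                (fun x => x != (a :: rs.map (fun l => l.headD 0)).headD 0) := by
            simp
          rw [hg, ih r' (rs.map List.tail)]
      · rw [show pvLcpS (a :: t') (b :: r') = [] from by rw [pvLcpS, if_neg hab]]
        have h2 : pvCols ([] :: rs) = [] := by rw [pvCols]; simp
        rw [h2]
        by_cases hemp : rs.any List.isEmpty
        · have h1 : pvCols ((a :: t') :: (b :: r') :: rs) = [] := by
            rw [pvCols]; simp [hemp]
          rw [h1]
        · have h1 : pvCols ((a :: t') :: (b :: r') :: rs)
              = (a :: b :: rs.map (fun l => l.headD 0))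
                :: pvCols (t' :: r' :: rs.map List.tail) := by
            rw [pvCols]; simp [hemp]
          rw [h1]
          simp only [pvCountB]
          have hT : (a :: b :: rs.map (fun l => l.headD 0)).any
              (fun x => x != (a :: b :: rs.map (fun l => l.headD 0)).headD 0) = true := by
            simp [bne_iff_ne, Ne.symm hab]
          rw [hT]
          simp

-- the column count equals the length of the pairwise fold
lemma pvN_fold (rest : List (List Int)) : ∀ first : List Int,
    pvCountB (pvCols (first :: rest)) = ((rest.foldl pvLcpS first).length : Int) := by
  induction rest with
  | nil => intro first; simpa using pvN_single first
  | cons r rs ih =>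
    intro first
    rw [List.foldl_cons, ← ih (pvLcpS first r), pvN_pairwise first r rs]

-- when some list has length ≤ i, the dropped family has an empty member and the column count is 0
lemma pvCountB_cols_stop (ts : List (List Int)) (h : ts ≠ []) (i : Nat)
    (hex : ∃ t ∈ ts, (t.length : Int) ≤ (i : Nat)) :
    pvCountB (pvCols (ts.map (List.drop i))) = 0 := by
  obtain ⟨t0, rest, rfl⟩ := List.exists_cons_of_ne_nil h
  obtain ⟨t, hmem, hlen⟩ := hex
  have hdrop : t.drop i = [] := by
    apply List.drop_eq_nil_of_le
    exact_mod_cast hlen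
  have hany : ((t0.drop i) :: rest.map (List.drop i)).any List.isEmpty = true := by
    simp only [List.any_eq_true]
    refine ⟨t.drop i, ?_, by simp [hdrop]⟩
    rcases List.mem_cons.mp hmem with rfl | hm
    · exact List.mem_cons_self
    · exact List.mem_cons_of_mem _ (List.mem_map_of_mem hm)
  simp only [List.map_cons]
  rw [pvCols]
  simp only [hany, if_true, pvCountB]

-- A's loop, started at column i, counts the remaining equal columns
lemma pvLoopA_inv (ts : List (List Int)) (h : ts ≠ []) (M : Int)
    (hle : ∀ t ∈ ts, M ≤ (t.length : Int)) (hmem : ∃ t ∈ ts, M = (t.length : Int)) (i : Nat) :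
    pvLoopA ts M i (i : Int) = (i : Int) + pvCountB (pvCols (ts.map (List.drop i))) := by
  have key : ∀ n : Nat, ∀ i : Nat, M.toNat - i ≤ n →
      pvLoopA ts M i (i : Int) = (i : Int) + pvCountB (pvCols (ts.map (List.drop i))) := by
    intro n
    induction n with
    | zero =>
      intro i hi
      have hnlt : ¬ ((i : Int) < M) := by omega
      rw [pvLoopA, if_neg hnlt]
      obtain ⟨t, htmem, htlen⟩ := hmem
      rw [pvCountB_cols_stop ts h i ⟨t, htmem, by omega⟩]
      ring
    | succ n ih =>
      intro i hi
      by_cases hlt : (i : Int) < M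
      · -- every list is longer than i
        have hall : ∀ t ∈ ts, i < t.length := by
          intro t ht
          have := hle t ht
          omega
        obtain ⟨t0, rest, rfl⟩ := List.exists_cons_of_ne_nil h
        have ht0 : i < t0.length := hall t0 List.mem_cons_self
        have hanyf : (t0.drop i :: rest.map (List.drop i)).any List.isEmpty = false := by
          simp only [List.any_eq_false, List.mem_cons, List.mem_map]
          rintro l (rfl | ⟨t, ht, rfl⟩)
          · simp only [List.isEmpty_iff, List.drop_eq_nil_iff]; omega
          · have := hall t (List.mem_cons_of_mem _ ht)
            simp only [List.isEmpty_iff, List.drop_eq_nil_iff]; omega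
        have htail : List.map List.tail (t0.drop i :: rest.map (List.drop i))
            = t0.drop (i+1) :: rest.map (List.drop (i+1)) := by
          simp only [List.map_cons, List.map_map]
          congr 1
          · exact List.tail_drop
          · exact List.map_congr_left (fun t _ => List.tail_drop)
        have hcols : pvCols ((t0 :: rest).map (List.drop i))
            = ((t0.drop i).headD 0 :: rest.map (fun t => (t.drop i).headD 0))
              :: pvCols ((t0 :: rest).map (List.drop (i+1))) := by
          simp only [List.map_cons]
          rw [pvCols, if_neg (by simp [hanyf]), htail]
          simp [List.map_map, Function.comp_def]
        have hhead : ∀ t ∈ (t0 :: rest), (t.drop i).headD 0 = PySem.List.pyGetD t (i : Int) 0 := by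
          intro t ht
          have hlt' := hall t ht
          rw [List.drop_eq_getElem_cons hlt', List.headD_cons,
            PySem.List.pyGetD_natCast, List.getD_eq_getElem _ _ hlt']
        have hh2 : (t0.drop i).headD 0 :: rest.map (fun t => (t.drop i).headD 0)
            = (t0 :: rest).map (fun t => PySem.List.pyGetD t (i : Int) 0) := by
          simp only [List.map_cons]
          congr 1
          · exact hhead t0 List.mem_cons_self
          · exact List.map_congr_left (fun t ht => hhead t (List.mem_cons_of_mem _ ht))
        have hguard : ((t0.drop i).headD 0 :: rest.map (fun t => (t.drop i).headD 0)).any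
              (fun x => x != ((t0.drop i).headD 0 :: rest.map (fun t => (t.drop i).headD 0)).headD 0)
            = !((t0 :: rest).all
                (fun t => PySem.List.pyGetD t (i : Int) 0 == PySem.List.pyGetD t0 (i : Int) 0)) := by
          rw [hh2]
          rw [show (List.map (fun t => PySem.List.pyGetD t (i : Int) 0) (t0 :: rest)).headD 0
              = PySem.List.pyGetD t0 (i : Int) 0 from by simp]
          rw [List.any_map]
          rw [List.any_eq_not_all_not]
          congr 1
          exact List.all_congr rfl (fun a => by simp only [Function.comp_apply, bne, Bool.not_not])
        have hcount : pvCountB (pvCols ((t0 :: rest).map (List.drop i)))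
            = if ((t0 :: rest).all
                (fun t => PySem.List.pyGetD t (i : Int) 0 == PySem.List.pyGetD t0 (i : Int) 0)) then
                1 + pvCountB (pvCols ((t0 :: rest).map (List.drop (i+1)))) else 0 := by
          rw [hcols, pvCountB, hguard]
          cases (t0 :: rest).all
              (fun t => PySem.List.pyGetD t (i : Int) 0 == PySem.List.pyGetD t0 (i : Int) 0) <;> simp
        rw [pvLoopA, if_pos hlt]
        simp only [List.headD_cons]
        rw [hcount]
        split_ifs with hCv
        · have hih := ih (i+1) (by omega)
          push_cast at hih
          rw [hih]
          ring
        · ring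
      · have hnlt : ¬ ((i : Int) < M) := hlt
        rw [pvLoopA, if_neg hnlt]
        obtain ⟨t, htmem, htlen⟩ := hmem
        rw [pvCountB_cols_stop ts h i ⟨t, htmem, by omega⟩]
        ring
  exact key (M.toNat - i) i le_rfl

-- ===== VERDICT (by name: the statement is the Claim_ definition above) =====
theorem find_common_prefix_length_py_spec : Claim_equal_find_common_prefix_length_py := by
  intro ts _
  show find_common_prefix_length_py ts = find_common_prefix_length_py_alt ts
  cases ts with
  | nil => rfl
  | cons first rest =>
    have h : (first :: rest : List (List Int)) ≠ [] := by simp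
    have halt : find_common_prefix_length_py_alt (first :: rest)
        = ((rest.foldl pvShrink first).length : Int) := rfl
    have hfold : rest.foldl pvShrink first = rest.foldl pvLcpS first := by
      have : pvShrink = pvLcpS := funext fun a => funext fun b => pvShrink_eq a b
      rw [this]
    rw [halt, hfold, ← pvN_fold rest first]
    unfold find_common_prefix_length_py
    simp only [h, if_false]
    obtain ⟨m, hm⟩ : ∃ m, PySem.List.min? ((first :: rest).map (fun t => (t.length : Int))) (fun x => x) = some m := by
      refine Option.isSome_iff_exists.mp ?_
      rw [Option.isSome_iff_ne_none]
      intro hn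
      rw [PySem.List.min?_eq_none_iff] at hn
      simp at hn
    have hle : ∀ t ∈ (first :: rest), m ≤ (t.length : Int) := by
      intro t ht
      have := PySem.List.min?_isMin hm ((t.length : Int)) (List.mem_map_of_mem ht)
      simpa using this
    have hmem : ∃ t ∈ (first :: rest), m = (t.length : Int) := by
      have := PySem.List.min?_mem hm
      rcases List.mem_map.mp this with ⟨t, ht, hts⟩
      exact ⟨t, ht, hts.symm⟩
    have hinv := pvLoopA_inv (first :: rest) h m hle hmem 0
    have hd0 : List.map (List.drop 0) (first :: rest) = first :: rest := by
      rw [show List.drop 0 = @id (List Int) from funext fun l => List.drop_zero]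
      exact List.map_id _
    rw [hd0] at hinv
    simp only [List.map_cons] at hm
    simpa [hm] using hinv
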